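-- pv_equiv track=rewrite | github.com/DLRW-test/sample-java-to-python | src/sample_project/control/double.py | sum_matrix
-- ===== SOURCE A (Python) =====
-- def sum_matrix(matrix: list[list[int]]) -> int:
--     """Sum all values in a square 2D matrix.
--
--     Iterates through all rows and columns of a square matrix to compute
--     the total sum of all elements.
--
--     Args:
--         matrix: A square 2D array of integers (n x n).
--
--     Returns:
--         The sum of all values in the matrix.
--
--     Raises:
--         TypeError: If matrix is None or any row is None.
--         ValueError: If matrix is not square (rows != columns).
--
--     Note:
--         Time complexity: O(n²) - nested loop over all matrix elements.
--     """
--     if matrix is None: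
--         raise TypeError("Matrix cannot be None")
--
--     total = 0
--     n = len(matrix)
--
--     for i in range(n):
--         if matrix[i] is None:
--             raise TypeError("Matrix row cannot be None")
--         if len(matrix[i]) != n:
--             raise ValueError(
--                 f"Matrix must be square, expected {n} columns but row {i} has {len(matrix[i])}"
--             )
--         for j in range(n):
--             total += matrix[i][j]
--
--     return total
-- ===== SOURCE B (Python) =====
-- def sum_matrix(matrix: list[list[int]]) -> int:
--     """Sum all values in a square 2D matrix: validate, then accumulate
--     per-column partial sums while streaming over the rows, and finally
--     add the column sums together."""
--     if matrix is None:
--         raise TypeError("Matrix cannot be None")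
--
--     n = len(matrix)
--     for i in range(n):
--         if matrix[i] is None:
--             raise TypeError("Matrix row cannot be None")
--         if len(matrix[i]) != n:
--             raise ValueError(
--                 f"Matrix must be square, expected {n} columns but row {i} has {len(matrix[i])}"
--             )
--
--     colsums = [0] * n
--     for row in matrix:
--         colsums = [c + x for c, x in zip(colsums, row)]
--     return sum(colsums)
-- ===== Notes on version B (the rewrite author's own statement) =====
-- stated objective: alternative
-- what changed: Replaces A's fused scalar-accumulator nested index loop with a validation-only pass followed by a vector accumulator of per-column partial sums (updated row by row via zip) that is collapsed at the end; a different state is maintained.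
import Mathlib
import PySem

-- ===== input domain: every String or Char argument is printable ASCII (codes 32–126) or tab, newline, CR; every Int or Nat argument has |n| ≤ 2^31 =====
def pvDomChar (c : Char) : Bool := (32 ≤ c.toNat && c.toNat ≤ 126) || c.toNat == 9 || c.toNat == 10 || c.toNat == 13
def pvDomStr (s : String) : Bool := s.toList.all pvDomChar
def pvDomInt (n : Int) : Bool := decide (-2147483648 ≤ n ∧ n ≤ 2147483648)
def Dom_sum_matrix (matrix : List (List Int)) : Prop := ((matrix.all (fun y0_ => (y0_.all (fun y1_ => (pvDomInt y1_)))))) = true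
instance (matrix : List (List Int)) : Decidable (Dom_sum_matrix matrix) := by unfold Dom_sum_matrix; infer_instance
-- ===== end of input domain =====

-- B validates first, then maintains a vector of per-column partial sums updated row by row
-- and adds the column sums at the end, instead of A's fused scalar nested index loop; same cost.

-- ===== PORT A =====
-- A: fused nested index loop with a scalar accumulator; the raising paths are excluded by Pre_.
def sum_matrix (matrix : List (List Int)) : Int :=
  let n : Int := matrix.length
  (PySem.List.pyRange 0 n 1).foldl (fun total i =>
    (PySem.List.pyRange 0 n 1).foldl (fun t j =>
      t + PySem.List.pyGetD (PySem.List.pyGetD matrix i []) j 0) total) 0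

-- ===== PORT B =====
-- B: validation pass only raises (excluded by Pre_); then colsums = [0]*n,
-- updated per row via zip, and sum(colsums) at the end.
def sum_matrix_alt (matrix : List (List Int)) : Int :=
  let n : Nat := matrix.length
  let colsums : List Int :=
    matrix.foldl (fun cs row => (cs.zip row).map (fun p => p.1 + p.2))
      (List.replicate n 0)
  colsums.foldl (fun s x => s + x) 0

-- ===== PRECONDITION & SPEC =====
-- Pre_ excludes exactly the non-square inputs, on which Python A raises ValueError
-- (a None matrix / None rows are not representable as List (List Int)).
def Pre_sum_matrix (matrix : List (List Int)) : Prop :=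
  ∀ row ∈ matrix, row.length = matrix.length
instance (matrix : List (List Int)) : Decidable (Pre_sum_matrix matrix) := by
  unfold Pre_sum_matrix; infer_instance

def pvWitness_sum_matrix : List (List Int) := [[1, 2], [3, 4]]

def Spec_sum_matrix (matrix : List (List Int)) (out : Int) : Prop := out = sum_matrix_alt matrix
instance (matrix : List (List Int)) (out : Int) : Decidable (Spec_sum_matrix matrix out) := by unfold Spec_sum_matrix; infer_instance

-- ===== CLAIM (what is proved, stated in full; the proofs are below) =====
def Claim_equal_sum_matrix : Prop := ∀ (matrix : List (List Int)), Dom_sum_matrix matrix → Pre_sum_matrix matrix → Spec_sum_matrix matrix (sum_matrix matrix)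

-- ===== LEMMAS AND PROOFS =====

-- Pulling the initial accumulator out of a left sum-fold.
theorem foldl_add_init (xs : List Int) (acc : Int) :
    xs.foldl (fun s x => s + x) acc = acc + xs.foldl (fun s x => s + x) 0 := by
  induction xs generalizing acc with
  | nil => simp
  | cons x xs ih => rw [List.foldl_cons, List.foldl_cons, ih (acc + x), ih (0 + x)]; ring

-- Summing the pointwise sum of two equal-length lists sums both lists.
theorem zip_add_sum (cs row : List Int) (h : cs.length = row.length) :
    ((cs.zip row).map (fun p => p.1 + p.2)).foldl (fun s x => s + x) 0 =
      cs.foldl (fun s x => s + x) 0 + row.foldl (fun s x => s + x) 0 := by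
  induction cs generalizing row with
  | nil =>
    have : row = [] := List.eq_nil_of_length_eq_zero h.symm
    subst this; simp
  | cons c cs ih =>
    cases row with
    | nil => simp at h
    | cons r rs =>
      simp only [List.length_cons, Nat.add_right_cancel_iff] at h
      simp only [List.zip_cons_cons, List.map_cons, List.foldl_cons]
      rw [foldl_add_init _ (0 + (c + r)), ih rs h,
          foldl_add_init cs (0 + c), foldl_add_init rs (0 + r)]
      ring

-- Pulling the initial accumulator out of the fold of row sums.
theorem foldl_rowsum_init (rows : List (List Int)) (acc : Int) :
    rows.foldl (fun a r => a + r.foldl (fun s x => s + x) 0) acc =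
      acc + rows.foldl (fun a r => a + r.foldl (fun s x => s + x) 0) 0 := by
  induction rows generalizing acc with
  | nil => simp
  | cons r rs ih =>
    rw [List.foldl_cons, List.foldl_cons, ih (acc + _), ih (0 + _)]; ring

-- The column-sum vector keeps length n across one row update.
theorem zip_add_length (cs row : List Int) (h : cs.length = row.length) :
    ((cs.zip row).map (fun p => p.1 + p.2)).length = cs.length := by
  simp [List.length_zip, h]

-- Invariant of B's row loop: the total of the column sums grows by each row's sum.
theorem colsums_invariant (rows : List (List Int)) (n : Nat) (cs : List Int)
    (hrows : ∀ r ∈ rows, r.length = n) (hcs : cs.length = n) :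
    (rows.foldl (fun cs row => (cs.zip row).map (fun p => p.1 + p.2)) cs).foldl
        (fun s x => s + x) 0 =
      cs.foldl (fun s x => s + x) 0 +
        rows.foldl (fun acc row => acc + row.foldl (fun s x => s + x) 0) 0 := by
  induction rows generalizing cs with
  | nil => simp
  | cons r rs ih =>
    have hr : r.length = n := hrows r (List.mem_cons_self ..)
    have hlen : cs.length = r.length := by rw [hcs, hr]
    simp only [List.foldl_cons]
    rw [ih _ (fun x hx => hrows x (List.mem_cons_of_mem _ hx))
          (by rw [zip_add_length cs r hlen, hcs]),
        zip_add_sum cs r hlen,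
        foldl_rowsum_init rs (0 + r.foldl (fun s x => s + x) 0)]
    ring

-- A's outer index loop is a fold over the rows themselves.
theorem sum_matrix_eq_rowfold (matrix : List (List Int)) :
    sum_matrix matrix =
      matrix.foldl (fun acc row =>
        (PySem.List.pyRange 0 (matrix.length : Int) 1).foldl
          (fun t j => t + PySem.List.pyGetD row j 0) acc) 0 := by
  unfold sum_matrix
  exact PySem.List.foldl_pyRange_zero_pyGetD matrix []
    (fun acc row =>
      (PySem.List.pyRange 0 (matrix.length : Int) 1).foldl
        (fun t j => t + PySem.List.pyGetD row j 0) acc) 0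

-- The initial [0]*n column-sum vector totals 0.
theorem replicate_zero_sum (n : Nat) :
    (List.replicate n (0 : Int)).foldl (fun s x => s + x) 0 = 0 := by
  induction n with
  | zero => simp
  | succ k ih => simp [List.replicate_succ, List.foldl_cons, ih]

-- ===== VERDICT (by name: the statement is the Claim_ definition above) =====
theorem sum_matrix_spec : Claim_equal_sum_matrix := by
  intro matrix _ hpre
  unfold Spec_sum_matrix sum_matrix_alt
  rw [sum_matrix_eq_rowfold,
      colsums_invariant matrix matrix.length (List.replicate matrix.length 0)
        (fun r hr => hpre r hr) (List.length_replicate),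
      replicate_zero_sum, zero_add]
  refine PySem.List.foldl_congr_mem _ _ _ _ ?_
  intro acc row hrow
  rw [← hpre row hrow, PySem.List.foldl_pyRange_zero_pyGetD']
  exact foldl_add_init row acc
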